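-- pv_equiv track=rewrite | github.com/p4lang/p4c | backends/tofino/bf-asm/walle/csr.py | canon_name
-- ===== SOURCE A (Python) =====
-- import string
--
-- class CsrException (Exception):
--     """
--     An exception that occured while crunching malformed data according to the
--     given chip schema. An exception handler in walle.py will catch these
--     exceptions and then attempt to print a "traceback" recording where in the
--     chip schema the exception occured.
--
--     This traceback is maintained by keeping a local variable called 'path' in
--     any scope where a CsrException may be raised. 'path' is a list of
--     traversal_history objects.
--     """
--     pass
--
-- def canon_name(name):
--     namestr = ''
--     nameargs = []
--     format = False
--     islong = False
--     for ch in name: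
--         if format:
--             if ch in string.digits:
--                 continue
--             elif ch == 'l':
--                 islong = True
--                 continue
--             elif ch == 'd' or ch == 'i' or ch == 'u' or ch == 'x':
--                 nameargs.append('long ' if islong else 'int ')
--             elif ch == 'e' or ch == 'f' or ch == 'g':
--                 nameargs.append('double ' if islong else 'float ')
--             elif ch == 's':
--                 nameargs.append('const char *')
--             else:
--                 raise CsrException("unknown conversion '%%%s' in name\n" % ch)
--             format = False
--         elif ch in string.ascii_letters or ch in string.digits or ch == '_':
--             namestr += ch
--         elif ch == '.':
--             namestr += '_'
--         elif ch == '%':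
--             format = True
--             islong = False
--         else:
--             raise CsrException("invalid character '%s' in name\n" % ch)
--     return namestr, nameargs
-- ===== SOURCE B (Python) =====
-- import string
--
-- class CsrException (Exception):
--     pass
--
-- def canon_name(name):
--     # Index-based scan that consumes each %-specifier as one token in an
--     # inner loop, eliminating the cross-iteration format/islong flags.
--     namestr = []
--     nameargs = []
--     i = 0
--     n = len(name)
--     while i < n:
--         ch = name[i]
--         i += 1
--         if ch == '%':
--             islong = False
--             while i < n and (name[i] in string.digits or name[i] == 'l'):
--                 if name[i] == 'l':
--                     islong = True
--                 i += 1
--             if i >= n: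
--                 break           # string ended inside a specifier: stop silently
--             c = name[i]
--             i += 1
--             if c in 'diux':
--                 nameargs.append('long ' if islong else 'int ')
--             elif c in 'efg':
--                 nameargs.append('double ' if islong else 'float ')
--             elif c == 's':
--                 nameargs.append('const char *')
--             else:
--                 raise CsrException("unknown conversion '%%%s' in name\n" % c)
--         elif ch in string.ascii_letters or ch in string.digits or ch == '_':
--             namestr.append(ch)
--         elif ch == '.':
--             namestr.append('_')
--         else:
--             raise CsrException("invalid character '%s' in name\n" % ch)
--     return ''.join(namestr), nameargs
-- ===== Notes on version B (the rewrite author's own statement) =====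
-- stated objective: simpler
-- what changed: Replaces the cross-iteration format/islong state flags with an index-based scan whose inner loop consumes each %-specifier as one token.
import Mathlib
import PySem

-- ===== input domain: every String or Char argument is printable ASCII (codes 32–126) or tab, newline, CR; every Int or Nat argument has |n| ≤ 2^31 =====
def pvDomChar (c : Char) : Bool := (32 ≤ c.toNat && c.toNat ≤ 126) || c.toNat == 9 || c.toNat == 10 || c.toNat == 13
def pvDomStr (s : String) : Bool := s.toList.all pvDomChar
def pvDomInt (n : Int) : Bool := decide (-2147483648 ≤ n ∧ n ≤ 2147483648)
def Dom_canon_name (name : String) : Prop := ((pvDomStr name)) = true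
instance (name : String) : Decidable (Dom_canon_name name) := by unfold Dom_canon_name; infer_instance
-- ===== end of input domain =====

-- B replaces A's cross-iteration format/islong flags by a scan whose inner loop
-- consumes each %-specifier as one token (objective: simpler, same cost).

-- ===== PORT A =====
-- A's single for-loop with the format/islong flags carried across iterations.
-- A's two `raise CsrException` branches are excluded by Pre_; the port returns
-- the current accumulation there (unreachable under Pre_).

def canon_name_go (cs : List Char) (namestr : String) (nameargs : List String)
    (format islong : Bool) : String × List String :=
  match cs with
  | [] => (namestr, nameargs)
  | ch :: rest =>
    if format then
      if ch.isDigit then canon_name_go rest namestr nameargs true islong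
      else if ch = 'l' then canon_name_go rest namestr nameargs true true
      else if ch = 'd' ∨ ch = 'i' ∨ ch = 'u' ∨ ch = 'x' then
        canon_name_go rest namestr (nameargs ++ [if islong then "long " else "int "]) false islong
      else if ch = 'e' ∨ ch = 'f' ∨ ch = 'g' then
        canon_name_go rest namestr (nameargs ++ [if islong then "double " else "float "]) false islong
      else if ch = 's' then
        canon_name_go rest namestr (nameargs ++ ["const char *"]) false islong
      else (namestr, nameargs)
    else if ch.isAlpha ∨ ch.isDigit ∨ ch = '_' then
      canon_name_go rest (namestr.push ch) nameargs false islong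
    else if ch = '.' then
      canon_name_go rest (namestr.push '_') nameargs false islong
    else if ch = '%' then
      canon_name_go rest namestr nameargs true false
    else (namestr, nameargs)
def canon_name (name : String) : String × List String :=
  canon_name_go name.toList "" [] false false

-- ===== PORT B =====
-- Source B's inner while loop: skip the run of digits/'l's tracking islong, and
-- return the rest of the string.
def pvSkipSpec (cs : List Char) (islong : Bool) : Bool × List Char :=
  match cs with
  | [] => (islong, [])
  | c :: rest =>
    if c.isDigit ∨ c = 'l' then pvSkipSpec rest (if c = 'l' then true else islong)
    else (islong, c :: rest)

theorem pvSkipSpec_len_le (cs : List Char) (islong : Bool) :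
    (pvSkipSpec cs islong).2.length ≤ cs.length := by
  induction cs generalizing islong with
  | nil => simp [pvSkipSpec]
  | cons c rest ih =>
    simp only [pvSkipSpec]
    split
    · exact Nat.le_succ_of_le (ih _)
    · simp

def canon_name_alt_go (cs : List Char) (namestr : List Char) (nameargs : List String) :
    List Char × List String :=
  match cs with
  | [] => (namestr, nameargs)
  | ch :: rest =>
    if ch = '%' then
      match _hs : pvSkipSpec rest false with
      | (_, []) => (namestr, nameargs)
      | (islong, c :: rest') =>
        if c = 'd' ∨ c = 'i' ∨ c = 'u' ∨ c = 'x' then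
          canon_name_alt_go rest' namestr (nameargs ++ [if islong then "long " else "int "])
        else if c = 'e' ∨ c = 'f' ∨ c = 'g' then
          canon_name_alt_go rest' namestr (nameargs ++ [if islong then "double " else "float "])
        else if c = 's' then
          canon_name_alt_go rest' namestr (nameargs ++ ["const char *"])
        else (namestr, nameargs)
    else if ch.isAlpha ∨ ch.isDigit ∨ ch = '_' then
      canon_name_alt_go rest (namestr ++ [ch]) nameargs
    else if ch = '.' then
      canon_name_alt_go rest (namestr ++ ['_']) nameargs
    else (namestr, nameargs)
termination_by cs.length
decreasing_by
  all_goals first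
  | (simp only [List.length_cons]; omega)
  | (have hle := pvSkipSpec_len_le rest false
     rw [_hs] at hle
     simp only [List.length_cons] at hle ⊢
     omega)

-- ''.join over the accumulated char list is String.ofList
def canon_name_alt (name : String) : String × List String :=
  ((canon_name_alt_go name.toList [] []).1 |> String.ofList, (canon_name_alt_go name.toList [] []).2)

-- ===== PRECONDITION & SPEC =====
-- Pre_ excludes exactly the inputs on which the Python A raises CsrException:
-- a character outside letters/digits/'_'/'.'/'%' in ordinary position, or a
-- %-specifier whose conversion character is not one of d i u x e f g s
-- (both Pythons raise CsrException there; neither returns a value).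
-- simple two-state validity automaton (spec grammar, not either port's code)
def pvValidName : List Char → Bool → Bool
  | [], _ => true
  | c :: rest, true =>
    if c.isDigit || c = 'l' then pvValidName rest true
    else (c = 'd' || c = 'i' || c = 'u' || c = 'x' || c = 'e' || c = 'f' || c = 'g' || c = 's')
      && pvValidName rest false
  | c :: rest, false =>
    if c = '%' then pvValidName rest true
    else (c.isAlpha || c.isDigit || c = '_' || c = '.') && pvValidName rest false

def Pre_canon_name (name : String) : Prop := pvValidName name.toList false = true
instance (name : String) : Decidable (Pre_canon_name name) := by unfold Pre_canon_name; infer_instance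

def pvWitness_canon_name : String := "reg.%3ld_%s"

def Spec_canon_name (name : String) (out : String × List String) : Prop := out = canon_name_alt name
instance (name : String) (out : String × List String) : Decidable (Spec_canon_name name out) := by unfold Spec_canon_name; infer_instance

-- ===== CLAIM (what is proved, stated in full; the proofs are below) =====
def Claim_equal_canon_name : Prop := ∀ (name : String), Dom_canon_name name → Pre_canon_name name → Spec_canon_name name (canon_name name)

-- ===== LEMMAS AND PROOFS =====

theorem format_eq_skip (cs : List Char) (il : Bool) (ns : String) (na : List String) :
    canon_name_go cs ns na true il =
      (match pvSkipSpec cs il with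
       | (_, []) => (ns, na)
       | (il', c :: rest') =>
         if c = 'd' ∨ c = 'i' ∨ c = 'u' ∨ c = 'x' then
           canon_name_go rest' ns (na ++ [if il' then "long " else "int "]) false il'
         else if c = 'e' ∨ c = 'f' ∨ c = 'g' then
           canon_name_go rest' ns (na ++ [if il' then "double " else "float "]) false il'
         else if c = 's' then
           canon_name_go rest' ns (na ++ ["const char *"]) false il'
         else (ns, na)) := by
  induction cs generalizing il with
  | nil => simp [canon_name_go, pvSkipSpec]
  | cons ch rest ih =>
    by_cases hd : ch.isDigit
    · have hl : ch ≠ 'l' := by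
        intro h; rw [h] at hd; exact absurd hd (by decide)
      rw [canon_name_go, pvSkipSpec]
      simp only [if_neg hl, hd, true_or, if_pos]
      rw [ih]
    · by_cases hl : ch = 'l'
      · subst hl
        rw [canon_name_go, pvSkipSpec]
        have h1 : (('l' : Char).isDigit = true ∨ ('l' : Char) = 'l') := by decide
        have h2 : ('l' : Char).isDigit = false := by decide
        simp only [h2, Bool.false_eq_true, if_false, ite_true]
        norm_num
        rw [ih]
      · have h1 : ¬ (ch.isDigit = true ∨ ch = 'l') := by simp [hd, hl]
        rw [canon_name_go, pvSkipSpec]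
        simp only [if_neg hl, hd, Bool.false_eq_true, if_false]
        norm_num [hl]

theorem ofList_push (l : List Char) (c : Char) :
    (String.ofList l).push c = String.ofList (l ++ [c]) := by
  apply String.toList_injective; simp

theorem main_eq (n : Nat) : ∀ (cs : List Char), cs.length ≤ n →
    ∀ (il : Bool) (pre : List Char) (na : List String),
    canon_name_go cs (String.ofList pre) na false il =
      (String.ofList (canon_name_alt_go cs pre na).1, (canon_name_alt_go cs pre na).2) := by
  induction n with
  | zero =>
    intro cs h il pre na
    have hnil : cs = [] := List.eq_nil_of_length_eq_zero (Nat.le_zero.mp h)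
    subst hnil
    rw [canon_name_go, canon_name_alt_go]
  | succ n ih =>
    intro cs h il pre na
    cases cs with
    | nil => rw [canon_name_go, canon_name_alt_go]
    | cons ch rest =>
      simp only [List.length_cons, Nat.succ_le_succ_iff] at h
      by_cases hp : ch = '%'
      · subst hp
        have hno : ¬ (('%' : Char).isAlpha = true ∨ ('%' : Char).isDigit = true ∨ ('%' : Char) = '_') := by decide
        have hnd : ('%' : Char) ≠ '.' := by decide
        rw [canon_name_go]
        simp only [Bool.false_eq_true, if_false, if_neg hno, if_neg hnd]
        rw [format_eq_skip, canon_name_alt_go]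
        rcases hE : pvSkipSpec rest false with ⟨il', cs'⟩
        simp only [if_pos trivial]
        cases cs' with
        | nil => split <;> simp_all
        | cons c rest' =>
          have hlen : rest'.length ≤ n := by
            have hle := pvSkipSpec_len_le rest false
            rw [hE] at hle
            simp only [List.length_cons] at hle
            omega
          split
          · rename_i heq
            simp at heq
          · rename_i islong c2 rest2 heq
            injection heq with e1 e2
            injection e2 with e3 e4
            subst e1; subst e3; subst e4
            simp only []
            split_ifs <;> first | rfl | exact ih _ hlen _ pre _
      · rw [canon_name_go, canon_name_alt_go]
        simp only [Bool.false_eq_true, if_false, if_neg hp]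
        by_cases h1 : ch.isAlpha = true ∨ ch.isDigit = true ∨ ch = '_'
        · simp only [if_pos h1]
          rw [ofList_push]
          exact ih rest h il _ na
        · simp only [if_neg h1]
          by_cases h2 : ch = '.'
          · simp only [if_pos h2]
            rw [ofList_push]
            exact ih rest h il _ na
          · simp only [if_neg h2]

-- ===== VERDICT (by name: the statement is the Claim_ definition above) =====
theorem canon_name_spec : Claim_equal_canon_name := by
  intro name _ _
  unfold Spec_canon_name canon_name canon_name_alt
  have hempty : ("" : String) = String.ofList [] := by
    apply String.toList_injective; simp
  rw [hempty]
  exact main_eq name.toList.length name.toList le_rfl false [] []
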